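-- pv_equiv track=rewrite | github.com/cn-vhql/verman | verman-py/version_manager.py | _detect_changes_accurate
-- ===== SOURCE A (Python) =====
-- from typing import List, Dict, Optional, Tuple
--
-- def _detect_changes_accurate(current_files: Dict[str, str], previous_files: Dict[str, str]) -> List[Dict]:
--     """
--     准确的变更检测逻辑，避免状态错误
--
--     Args:
--         current_files: 当前文件状态
--         previous_files: 上次文件状态
--
--     Returns:
--         变更列表
--     """
--     changes = []
--
--     # 获取文件路径集合
--     current_set = set(current_files.keys())
--     previous_set = set(previous_files.keys())
--
--     # 1. 检测新增文件
--     added_files = current_set - previous_set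
--     for file_path in sorted(added_files):
--         if not file_path.startswith('.verman'):
--             changes.append({
--                 'relative_path': file_path,
--                 'file_hash': current_files[file_path],
--                 'file_status': 'add'
--             })
--
--     # 2. 检测修改文件（基于哈希值比较）
--     common_files = current_set & previous_set
--     for file_path in sorted(common_files):
--         current_hash = current_files[file_path]
--         previous_hash = previous_files[file_path]
--
--         if current_hash != previous_hash:
--             changes.append({
--                 'relative_path': file_path,
--                 'file_hash': current_hash,
--                 'file_status': 'modify'
--             })
--
--     # 3. 检测删除文件
--     deleted_files = previous_set - current_set
--     for file_path in sorted(deleted_files):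
--         if not file_path.startswith('.verman'):
--             changes.append({
--                 'relative_path': file_path,
--                 'file_hash': previous_files.get(file_path, ''),
--                 'file_status': 'delete'
--             })
--
--     return changes
-- ===== SOURCE B (Python) =====
-- def _detect_changes_accurate(current_files, previous_files):
--     """Single pass over the sorted union of paths, classifying each into one of
--     three buckets; concatenating the buckets reproduces the add/modify/delete
--     order of the original."""
--     added, modified, deleted = [], [], []
--     for path in sorted(set(current_files) | set(previous_files)):
--         if path in current_files:
--             if path in previous_files:
--                 if current_files[path] != previous_files[path]:
--                     modified.append({
--                         'relative_path': path,
--                         'file_hash': current_files[path],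
--                         'file_status': 'modify'
--                     })
--             elif not path.startswith('.verman'):
--                 added.append({
--                     'relative_path': path,
--                     'file_hash': current_files[path],
--                     'file_status': 'add'
--                 })
--         elif not path.startswith('.verman'):
--             deleted.append({
--                 'relative_path': path,
--                 'file_hash': previous_files[path],
--                 'file_status': 'delete'
--             })
--     return added + modified + deleted
-- ===== Notes on version B (the rewrite author's own statement) =====
-- stated objective: alternative
-- what changed: Replaces three set-difference/intersection computations each followed by its own sort and loop with one sort of the key union and a single classifying pass into three buckets that are concatenated.
import Mathlib
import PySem

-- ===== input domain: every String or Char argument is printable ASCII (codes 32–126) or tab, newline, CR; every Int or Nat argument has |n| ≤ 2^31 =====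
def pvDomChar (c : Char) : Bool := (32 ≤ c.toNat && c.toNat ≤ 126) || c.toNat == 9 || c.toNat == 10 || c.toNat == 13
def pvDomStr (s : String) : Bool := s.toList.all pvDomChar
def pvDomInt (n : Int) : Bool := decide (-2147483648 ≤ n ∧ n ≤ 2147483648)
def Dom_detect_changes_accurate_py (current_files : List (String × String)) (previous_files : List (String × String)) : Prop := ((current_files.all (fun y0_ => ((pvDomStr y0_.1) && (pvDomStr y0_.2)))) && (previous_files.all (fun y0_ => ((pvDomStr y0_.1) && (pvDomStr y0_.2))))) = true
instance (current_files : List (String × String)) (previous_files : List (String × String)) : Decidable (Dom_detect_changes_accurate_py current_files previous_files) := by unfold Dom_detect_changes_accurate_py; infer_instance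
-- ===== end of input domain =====

-- ===== PORT A =====
-- B is an alternative decomposition of the same O(n log n) task: one sorted pass over the
-- union of keys instead of three set operations each with its own sort and loop.
-- shared dict-lookup helper: d[k] (key always present at every call site) and d.get(k, '')
-- — first-match association-list lookup, exact wherever the Python returns.
def pvLookup (d : List (String × String)) (k : String) : String :=
  match d.find? (fun kv => kv.1 == k) with
  | some kv => kv.2
  | none => ""

def detect_changes_accurate_py (current_files : List (String × String)) (previous_files : List (String × String)) : List (List (String × String)) :=
  let changes : List (List (String × String)) := []
  let current_set : PySem.Set String := PySem.Set.ofList (current_files.map (·.1))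
  let previous_set : PySem.Set String := PySem.Set.ofList (previous_files.map (·.1))
  -- 1. added files
  let added_files := PySem.Set.diff current_set previous_set
  let changes := (PySem.List.sorted added_files (fun x => x) false).foldl
    (fun acc file_path =>
      if !(PySem.Str.startswith file_path ".verman") then
        acc ++ [[("relative_path", file_path), ("file_hash", pvLookup current_files file_path), ("file_status", "add")]]
      else acc) changes
  -- 2. modified files
  let common_files := PySem.Set.inter current_set previous_set
  let changes := (PySem.List.sorted common_files (fun x => x) false).foldl
    (fun acc file_path =>
      let current_hash := pvLookup current_files file_path
      let previous_hash := pvLookup previous_files file_path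
      if current_hash != previous_hash then
        acc ++ [[("relative_path", file_path), ("file_hash", current_hash), ("file_status", "modify")]]
      else acc) changes
  -- 3. deleted files
  let deleted_files := PySem.Set.diff previous_set current_set
  let changes := (PySem.List.sorted deleted_files (fun x => x) false).foldl
    (fun acc file_path =>
      if !(PySem.Str.startswith file_path ".verman") then
        acc ++ [[("relative_path", file_path), ("file_hash", pvLookup previous_files file_path), ("file_status", "delete")]]
      else acc) changes
  changes

-- ===== PORT B =====
-- loop body of Source B's single classifying pass, as a named helper
def pvStep (current_files previous_files : List (String × String))
    (acc : List (List (String × String)) × List (List (String × String)) × List (List (String × String)))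
    (path : String) :
    List (List (String × String)) × List (List (String × String)) × List (List (String × String)) :=
  let (added, modified, deleted) := acc
  if (current_files.map (·.1)).contains path then
    if (previous_files.map (·.1)).contains path then
      if pvLookup current_files path != pvLookup previous_files path then
        (added, modified ++ [[("relative_path", path), ("file_hash", pvLookup current_files path), ("file_status", "modify")]], deleted)
      else acc
    else if !(PySem.Str.startswith path ".verman") then
      (added ++ [[("relative_path", path), ("file_hash", pvLookup current_files path), ("file_status", "add")]], modified, deleted)
    else acc
  else if !(PySem.Str.startswith path ".verman") then
    (added, modified, deleted ++ [[("relative_path", path), ("file_hash", pvLookup previous_files path), ("file_status", "delete")]])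
  else acc

def detect_changes_accurate_py_alt (current_files : List (String × String)) (previous_files : List (String × String)) : List (List (String × String)) :=
  let union := PySem.Set.union (PySem.Set.ofList (current_files.map (·.1))) (previous_files.map (·.1))
  let r := (PySem.List.sorted union (fun x => x) false).foldl (pvStep current_files previous_files) ([], [], [])
  r.1 ++ r.2.1 ++ r.2.2

-- ===== PRECONDITION & SPEC =====
def Spec_detect_changes_accurate_py (current_files : List (String × String)) (previous_files : List (String × String)) (out : List (List (String × String))) : Prop := out = detect_changes_accurate_py_alt current_files previous_files
instance (current_files : List (String × String)) (previous_files : List (String × String)) (out : List (List (String × String))) : Decidable (Spec_detect_changes_accurate_py current_files previous_files out) := by unfold Spec_detect_changes_accurate_py; infer_instance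

-- ===== CLAIM (what is proved, stated in full; the proofs are below) =====
def Claim_equal_detect_changes_accurate_py : Prop := ∀ (current_files : List (String × String)) (previous_files : List (String × String)), Dom_detect_changes_accurate_py current_files previous_files → Spec_detect_changes_accurate_py current_files previous_files (detect_changes_accurate_py current_files previous_files)

-- ===== LEMMAS AND PROOFS =====

-- B's fold splits into three filtered-mapped buckets
theorem pvStep_eq (cur prev : List (String × String))
    (acc : List (List (String × String)) × List (List (String × String)) × List (List (String × String)))
    (x : String) :
    pvStep cur prev acc x =
      (acc.1 ++ (if (cur.map (·.1)).contains x && !(prev.map (·.1)).contains x && !(PySem.Str.startswith x ".verman") then [[("relative_path", x), ("file_hash", pvLookup cur x), ("file_status", "add")]] else []),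
       acc.2.1 ++ (if (cur.map (·.1)).contains x && (prev.map (·.1)).contains x && (pvLookup cur x != pvLookup prev x) then [[("relative_path", x), ("file_hash", pvLookup cur x), ("file_status", "modify")]] else []),
       acc.2.2 ++ (if !(cur.map (·.1)).contains x && !(PySem.Str.startswith x ".verman") then [[("relative_path", x), ("file_hash", pvLookup prev x), ("file_status", "delete")]] else [])) := by
  obtain ⟨a, m, d⟩ := acc
  by_cases hc : (cur.map (·.1)).contains x = true <;>
    by_cases hp : (prev.map (·.1)).contains x = true <;>
    by_cases hv : PySem.Str.startswith x ".verman" = true <;>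
    by_cases hh : (pvLookup cur x != pvLookup prev x) = true <;>
    simp_all [pvStep]

theorem pv_bfold (cur prev : List (String × String)) (l : List String)
    (a m d : List (List (String × String))) :
    l.foldl (pvStep cur prev) (a, m, d)
    = (a ++ ((l.filter (fun p => (cur.map (·.1)).contains p && !(prev.map (·.1)).contains p && !(PySem.Str.startswith p ".verman"))).map (fun x => [("relative_path", x), ("file_hash", pvLookup cur x), ("file_status", "add")])),
       m ++ ((l.filter (fun p => (cur.map (·.1)).contains p && (prev.map (·.1)).contains p && (pvLookup cur p != pvLookup prev p))).map (fun x => [("relative_path", x), ("file_hash", pvLookup cur x), ("file_status", "modify")])),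
       d ++ ((l.filter (fun p => !(cur.map (·.1)).contains p && !(PySem.Str.startswith p ".verman"))).map (fun x => [("relative_path", x), ("file_hash", pvLookup prev x), ("file_status", "delete")]))) := by
  induction l generalizing a m d with
  | nil => simp
  | cons x xs ih =>
    rw [List.foldl_cons, pvStep_eq, ih]
    simp only [List.filter_cons]
    split_ifs <;> simp

-- a sorted pass over a duplicate-free list is strictly increasing
theorem pv_sorted_lt (s : List String) (hs : s.Nodup) :
    (PySem.List.sorted s (fun x => x) false).Pairwise (· < ·) := by
  have h1 := PySem.List.sorted_pairwise (xs := s) (key := fun x : String => x)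
  have h2 : (PySem.List.sorted s (fun x => x) false).Nodup :=
    (PySem.List.sorted_perm s (fun x => x) false).nodup_iff.mpr hs
  exact (h1.and h2).imp (fun ⟨hle, hne⟩ => lt_of_le_of_ne hle hne)

-- filtering the sorted union with a membership test IS sorting the corresponding set
theorem pv_filter_sorted (s u : List String) (q : String → Bool)
    (hs : s.Nodup) (hu : u.Nodup)
    (hmem : ∀ x, x ∈ s ↔ (x ∈ u ∧ q x = true)) :
    (PySem.List.sorted u (fun x => x) false).filter q = PySem.List.sorted s (fun x => x) false := by
  have hperm : ((PySem.List.sorted u (fun x => x) false).filter q).Perm s := by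
    refine (List.perm_ext_iff_of_nodup
      (List.Nodup.filter q ((PySem.List.sorted_perm u (fun x => x) false).nodup_iff.mpr hu)) hs).mpr ?_
    intro x
    simp only [List.mem_filter, PySem.List.mem_sorted]
    exact ⟨fun h => (hmem x).mpr h, fun h => (hmem x).mp h⟩
  have hlt := List.Pairwise.filter q (pv_sorted_lt u hu)
  exact (PySem.List.sorted_eq_of_perm_of_pairwise_lt _ _ _ hperm hlt).symm

theorem detect_changes_accurate_py_spec_aux (cur prev : List (String × String)) :
    detect_changes_accurate_py cur prev = detect_changes_accurate_py_alt cur prev := by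
  simp only [detect_changes_accurate_py, detect_changes_accurate_py_alt]
  rw [pv_bfold]
  have hcs := PySem.Set.nodup_ofList (cur.map (·.1))
  have hps := PySem.Set.nodup_ofList (prev.map (·.1))
  have hun := PySem.Set.nodup_union (PySem.Set.ofList (cur.map (·.1))) (prev.map (·.1)) hcs
  have hadd := pv_filter_sorted
      (PySem.Set.diff (PySem.Set.ofList (cur.map (·.1))) (PySem.Set.ofList (prev.map (·.1))))
      (PySem.Set.union (PySem.Set.ofList (cur.map (·.1))) (prev.map (·.1)))
      (fun p => (cur.map (·.1)).contains p && !(prev.map (·.1)).contains p)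
      (PySem.Set.nodup_diff _ _ hcs) hun
      (by intro x
          simp [PySem.Set.mem_diff, PySem.Set.mem_union, PySem.Set.mem_ofList]
          tauto)
  have hmod := pv_filter_sorted
      (PySem.Set.inter (PySem.Set.ofList (cur.map (·.1))) (PySem.Set.ofList (prev.map (·.1))))
      (PySem.Set.union (PySem.Set.ofList (cur.map (·.1))) (prev.map (·.1)))
      (fun p => (cur.map (·.1)).contains p && (prev.map (·.1)).contains p)
      (PySem.Set.nodup_inter _ _ hcs) hun
      (by intro x
          simp [PySem.Set.mem_inter, PySem.Set.mem_union, PySem.Set.mem_ofList]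
          tauto)
  have hdel := pv_filter_sorted
      (PySem.Set.diff (PySem.Set.ofList (prev.map (·.1))) (PySem.Set.ofList (cur.map (·.1))))
      (PySem.Set.union (PySem.Set.ofList (cur.map (·.1))) (prev.map (·.1)))
      (fun p => !(cur.map (·.1)).contains p)
      (PySem.Set.nodup_diff _ _ hps) hun
      (by intro x
          simp [PySem.Set.mem_diff, PySem.Set.mem_union, PySem.Set.mem_ofList]
          tauto)
  simp only [PySem.List.foldl_append_if]
  rw [← hadd, ← hmod, ← hdel]
  simp [List.filter_filter, Bool.and_comm, List.append_assoc]

-- ===== VERDICT (by name: the statement is the Claim_ definition above) =====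
theorem detect_changes_accurate_py_spec : Claim_equal_detect_changes_accurate_py := by
  intro cur prev _
  exact detect_changes_accurate_py_spec_aux cur prev
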